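-- pv_equiv track=rewrite | github.com/dgoldman0/proofstore | backend/cli.py | _split_csv_or_repeat
-- ===== SOURCE A (Python) =====
-- def _split_csv_or_repeat(values: list[str] | None) -> list[str]:
--     """
--     Split comma-separated strings in command-line inputs. If a value contains
--     commas, it will be split; otherwise values are appended directly. Empty
--     parts are discarded.
--     """
--     if not values:
--         return []
--     out: list[str] = []
--     for v in values:
--         parts = [p.strip() for p in v.split(",")] if "," in v else [v.strip()]
--         out.extend([p for p in parts if p])
--     return out
-- ===== SOURCE B (Python) =====
-- def _split_csv_or_repeat(values):
--     """Same result as A: one global join+split instead of a per-value branch/split loop."""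
--     if not values:
--         return []
--     parts = ",".join(values).split(",")
--     return [p for p in (s.strip() for s in parts) if p]
-- ===== Notes on version B (the rewrite author's own statement) =====
-- stated objective: simpler
-- what changed: B replaces A's per-value loop with its contains-comma branch and per-value split by one global ','.join(values).split(',') followed by a single strip-and-filter comprehension.
import Mathlib
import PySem

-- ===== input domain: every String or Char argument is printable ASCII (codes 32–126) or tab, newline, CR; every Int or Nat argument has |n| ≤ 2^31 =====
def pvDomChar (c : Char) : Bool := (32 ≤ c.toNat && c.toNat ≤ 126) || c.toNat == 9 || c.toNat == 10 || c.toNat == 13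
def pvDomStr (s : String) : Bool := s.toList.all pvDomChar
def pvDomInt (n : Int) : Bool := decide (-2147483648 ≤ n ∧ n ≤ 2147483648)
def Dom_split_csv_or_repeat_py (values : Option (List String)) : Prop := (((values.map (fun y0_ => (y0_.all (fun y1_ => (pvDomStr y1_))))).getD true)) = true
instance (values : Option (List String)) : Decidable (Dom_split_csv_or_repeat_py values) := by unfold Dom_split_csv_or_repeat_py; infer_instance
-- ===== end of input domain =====

-- B replaces A's per-value branch-and-split loop by one global join-then-split pass (objective: simpler).


-- ===== PORT A =====
-- 'if not values: return []'; then for each v: split on ',' if it contains one else [v.strip()], keep non-empty parts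
def split_csv_or_repeat_py (values : Option (List String)) : List String :=
  let vs := values.getD []
  if vs = [] then []
  else
    vs.foldl (fun out v =>
      let parts : List String :=
        if PySem.Str.isIn "," v then
          (PySem.Chars.splitOn v.toList ",".toList).map (fun p => String.ofList (PySem.Chars.strip p))
        else [String.ofList (PySem.Chars.strip v.toList)]
      out ++ parts.filter (fun p => p ≠ "")) []

-- ===== PORT B =====
-- same guard; then parts = ','.join(values).split(','), strip each, keep non-empty
def split_csv_or_repeat_py_alt (values : Option (List String)) : List String :=
  let vs := values.getD []
  if vs = [] then []
  else
    let parts := PySem.Chars.splitOn (PySem.Chars.join [','] (vs.map String.toList)) [',']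
    ((parts.map (fun s => PySem.Chars.strip s)).filter (fun p => p ≠ [])).map String.ofList

-- ===== PRECONDITION & SPEC =====
def Spec_split_csv_or_repeat_py (values : Option (List String)) (out : List String) : Prop := out = split_csv_or_repeat_py_alt values
instance (values : Option (List String)) (out : List String) : Decidable (Spec_split_csv_or_repeat_py values out) := by unfold Spec_split_csv_or_repeat_py; infer_instance

-- ===== CLAIM (what is proved, stated in full; the proofs are below) =====
def Claim_equal_split_csv_or_repeat_py : Prop := ∀ (values : Option (List String)), Dom_split_csv_or_repeat_py values → Spec_split_csv_or_repeat_py values (split_csv_or_repeat_py values)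

-- ===== LEMMAS AND PROOFS =====

-- PySem's fuel-based splitOn with a single-char separator is List.splitOn
theorem go_single (c : Char) : ∀ (fuel : Nat) (l cur : List Char) (acc : List (List Char)),
    l.length < fuel →
    PySem.Chars.splitOn.go [c] fuel l cur acc = acc.reverse ++ (List.splitOn c l).modifyHead (cur.reverse ++ ·) := by
  intro fuel
  induction fuel with
  | zero => intro l cur acc h; omega
  | succ n ih =>
    intro l cur acc h
    match l with
    | [] =>
      simp [PySem.Chars.splitOn.go, List.splitOn, List.splitOnP_nil]
    | x :: rest =>
      by_cases hx : x = c
      · subst hx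
        rw [show PySem.Chars.splitOn.go [x] (n+1) (x :: rest) cur acc
              = PySem.Chars.splitOn.go [x] n rest [] (cur.reverse :: acc) by
            simp [PySem.Chars.splitOn.go, List.isPrefixOf]]
        rw [ih rest [] (cur.reverse :: acc) (by simpa using Nat.lt_of_succ_lt_succ h)]
        have : List.splitOn x (x :: rest) = [] :: List.splitOn x rest := by
          simp [List.splitOn, List.splitOnP_cons]
        rw [this]
        cases List.splitOn x rest <;> simp
      · rw [show PySem.Chars.splitOn.go [c] (n+1) (x :: rest) cur acc
              = PySem.Chars.splitOn.go [c] n rest (x :: cur) acc by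
            simp [PySem.Chars.splitOn.go, List.isPrefixOf]; intro hc; exact absurd hc.symm hx]
        rw [ih rest (x :: cur) acc (by simpa using Nat.lt_of_succ_lt_succ h)]
        have : List.splitOn c (x :: rest)
            = (List.splitOn c rest).modifyHead (x :: ·) := by
          simp [List.splitOn, List.splitOnP_cons, hx]
        rw [this, List.modifyHead_modifyHead]
        cases List.splitOn c rest <;> simp [List.reverse_cons]
  
theorem chars_splitOn_single (c : Char) (l : List Char) :
    PySem.Chars.splitOn l [c] = List.splitOn c l := by
  have h := go_single c (l.length + 1) l [] [] (by omega)
  simp only [List.reverse_nil, List.nil_append] at h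
  rw [PySem.Chars.splitOn, h]
  cases List.splitOn c l <;> simp

theorem modifyHead_append_ne_nil {α : Type} (f : α → α) (u v : List α) (h : u ≠ []) :
    (u ++ v).modifyHead f = u.modifyHead f ++ v := by
  cases u with
  | nil => exact absurd rfl h
  | cons x xs => simp

-- splitting at an explicit separator occurrence concatenates the two splits
theorem splitOnP_append_sep (p : Char → Bool) (a b : List Char) (x : Char) (hx : p x = true) :
    List.splitOnP p (a ++ x :: b) = List.splitOnP p a ++ List.splitOnP p b := by
  induction a with
  | nil => simp [List.splitOnP_cons, hx, List.splitOnP_nil]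
  | cons y a' ih =>
    by_cases hy : p y = true
    · simp [List.splitOnP_cons, hy, ih]
    · simp only [List.cons_append, List.splitOnP_cons, hy, Bool.false_eq_true, if_false, ih]
      rw [modifyHead_append_ne_nil _ _ _ (List.splitOnP_ne_nil p a')]

-- split of the comma-join is the concatenation of the individual splits (nonempty list)
theorem splitOn_intercalate_flat (c : Char) (parts : List (List Char)) (h : parts ≠ []) :
    List.splitOn c ([c].intercalate parts) = parts.flatMap (List.splitOn c) := by
  induction parts with
  | nil => exact absurd rfl h
  | cons a rest ih =>
    match rest with
    | [] => simp [List.intercalate]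
    | b :: rs =>
      have : [c].intercalate (a :: b :: rs) = a ++ c :: [c].intercalate (b :: rs) := by
        simp [List.intercalate, List.intersperse]
      rw [this]
      have := splitOnP_append_sep (· == c) a ([c].intercalate (b :: rs)) c (by simp)
      simp only [List.splitOn] at *
      rw [this, ih (by simp)]
      simp [List.splitOn]

-- a list without c splits to itself
theorem splitOn_of_not_mem (c : Char) (l : List Char) (h : c ∉ l) : List.splitOn c l = [l] := by
  induction l with
  | nil => simp [List.splitOn, List.splitOnP_nil]
  | cons x rest ih =>
    have hx : x ≠ c := fun e => h (e ▸ List.mem_cons_self)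
    have : List.splitOn c (x :: rest) = (List.splitOn c rest).modifyHead (x :: ·) := by
      simp [List.splitOn, List.splitOnP_cons, hx]
    rw [this, ih (fun hm => h (List.mem_cons_of_mem _ hm))]
    simp

-- per-value body of A = per-value piece of B
theorem body_eq (v : String) :
    ((if PySem.Str.isIn "," v then
          (PySem.Chars.splitOn v.toList ",".toList).map (fun p => String.ofList (PySem.Chars.strip p))
        else [String.ofList (PySem.Chars.strip v.toList)]).filter (fun p => p ≠ ""))
    = (((List.splitOn ',' v.toList).map (fun s => PySem.Chars.strip s)).filter (fun p => p ≠ [])).map String.ofList := by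
  have hsingle : PySem.Chars.splitOn v.toList ",".toList = List.splitOn ',' v.toList := by
    simpa using chars_splitOn_single ',' v.toList
  have hof : ∀ p : List Char, (decide (String.ofList p ≠ "")) = (decide (p ≠ [])) := by
    intro p
    by_cases h : p = [] <;> simp [h]
  by_cases hin : PySem.Str.isIn "," v = true
  · simp only [hin, if_true, hsingle, List.filter_map, List.map_map]
    have hpred : ((fun p => decide (p ≠ "")) ∘ fun p => String.ofList (PySem.Chars.strip p))
        = ((fun p => decide (p ≠ ([] : List Char))) ∘ fun s => PySem.Chars.strip s) := by
      funext s; simp [Function.comp]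
    rw [hpred]
    rfl
  · have hnot : ',' ∉ v.toList := by
      have h1 : ¬ (",".toList <:+: v.toList) := by
        rw [← PySem.Str.isIn_iff_infix]; simpa using hin
      intro hm
      rcases List.mem_iff_append.mp hm with ⟨sfx, tfx, heq⟩
      exact h1 ⟨sfx, tfx, by simp [heq]⟩
    simp only [Bool.not_eq_true] at hin
    simp only [hin, Bool.false_eq_true, if_false]
    rw [splitOn_of_not_mem ',' v.toList hnot]
    by_cases hz : PySem.Chars.strip v.toList = [] <;>
      simp [hz, List.filter]

-- ===== VERDICT (by name: the statement is the Claim_ definition above) =====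
theorem split_csv_or_repeat_py_spec : Claim_equal_split_csv_or_repeat_py := by
  intro values _
  unfold Spec_split_csv_or_repeat_py split_csv_or_repeat_py split_csv_or_repeat_py_alt
  set vs := values.getD [] with hvs
  by_cases hnil : vs = []
  · simp [hnil]
  · simp only [hnil, if_false]
    have hjoin : PySem.Chars.join [','] (vs.map String.toList)
        = [','].intercalate (vs.map String.toList) := rfl
    rw [hjoin, chars_splitOn_single,
        splitOn_intercalate_flat ',' (vs.map String.toList) (by simpa using hnil),
        List.flatMap_map, List.map_flatMap, List.filter_flatMap, List.map_flatMap,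
        PySem.List.foldl_append_eq_flatMap]
    simp only [List.nil_append]
    congr 1
    funext v
    exact body_eq v
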